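-- pv_equiv track=rewrite | github.com/MadKamel/python-morse-code-encoder | main.py | formatMMsg
-- ===== SOURCE A (Python) =====
-- def formatMMsg(txt):
--     output = ""
--     for i in range(len(txt)):
--         if not txt[i] == " ":
--             output = output + txt[i].upper()
--             if i == len(txt)-1:                 # i honestly don't know how this works
--                 pass                            # i'm sorry
--             elif not txt[i+1] == " ":
--                 output = output + "-"
--         else:
--             output = output + "_"
--     return output
-- ===== SOURCE B (Python) =====
-- def formatMMsg(txt):
--     return "_".join("-".join(c.upper() for c in w) for w in txt.split(" "))
-- ===== Notes on version B (the rewrite author's own statement) =====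
-- stated objective: idiomatic
-- what changed: Replaces A's character-index loop with a next-character look-ahead and a last-index special case by a split/join decomposition: split the text on spaces, join each word's uppercased characters with dashes, and join the words with underscores.
import Mathlib
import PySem

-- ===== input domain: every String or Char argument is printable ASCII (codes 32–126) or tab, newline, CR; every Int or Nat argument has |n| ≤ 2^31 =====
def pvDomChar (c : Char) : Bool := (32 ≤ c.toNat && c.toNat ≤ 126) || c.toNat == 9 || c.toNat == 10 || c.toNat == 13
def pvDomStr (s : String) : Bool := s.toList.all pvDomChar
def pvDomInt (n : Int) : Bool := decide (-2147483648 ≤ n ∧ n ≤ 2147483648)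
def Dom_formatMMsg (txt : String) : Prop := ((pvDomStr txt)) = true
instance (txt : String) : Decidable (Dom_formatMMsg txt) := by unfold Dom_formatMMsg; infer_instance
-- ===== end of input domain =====

-- B replaces A's index loop with look-ahead by splitting on ' ' and joining each word's
-- uppercased characters with '-', the words with '_' (objective: simpler/idiomatic).

-- ===== PORT A =====
-- literal port of A's index loop: for i in range(len(txt)) with txt[i] / txt[i+1] look-ahead
-- loop body of A (one iteration of the for-loop)
def pvBodyA (cs : List Char) (output : List Char) (i : Int) : List Char :=
  let c := PySem.List.pyGetD cs i ' '          -- txt[i]; index always in range, default unused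
  if ¬ (c == ' ') then
    let output := output ++ PySem.Chars.upper [c]
    if i == (cs.length : Int) - 1 then output
    else if ¬ (PySem.List.pyGetD cs (i + 1) ' ' == ' ') then output ++ ['-']
    else output
  else output ++ ['_']

def formatMMsg (txt : String) : String :=
  let cs := txt.toList
  let n : Int := (cs.length : Int)
  String.ofList ((PySem.List.pyRange 0 n 1).foldl (pvBodyA cs) [])

-- ===== PORT B =====
-- port of Source B: "_".join("-".join(c.upper() for c in w) for w in txt.split(" "))
def formatMMsg_alt (txt : String) : String :=
  String.ofList (List.intercalate ['_']
    ((txt.toList.splitOn ' ').map (fun w =>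
      List.intercalate ['-'] (w.map (fun c => [PySem.Chars.upperChar c])))))

-- ===== PRECONDITION & SPEC =====
def Spec_formatMMsg (txt : String) (out : String) : Prop := out = formatMMsg_alt txt
instance (txt : String) (out : String) : Decidable (Spec_formatMMsg txt out) := by unfold Spec_formatMMsg; infer_instance

-- ===== CLAIM (what is proved, stated in full; the proofs are below) =====
def Claim_equal_formatMMsg : Prop := ∀ (txt : String), Dom_formatMMsg txt → Spec_formatMMsg txt (formatMMsg txt)

-- ===== LEMMAS AND PROOFS =====

-- common characterization: one char of output per input char, plus a dash between
-- two adjacent non-space characters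
def pvRender : List Char → List Char
  | [] => []
  | c :: rest =>
    (if c = ' ' then ['_']
     else PySem.Chars.upperChar c ::
       (match rest with
        | [] => []
        | d :: _ => if d = ' ' then [] else ['-'])) ++ pvRender rest

theorem pyRange_nil_of_le (a b : Int) (h : b ≤ a) : PySem.List.pyRange a b 1 = [] := by
  simp [PySem.List.pyRange]; omega

-- A's loop from index k produces pvRender of the suffix
theorem loopA_eq (cs : List Char) :
    ∀ (suf : List Char) (k : Nat) (_ : cs.drop k = suf) (acc : List Char),
    (PySem.List.pyRange (k : Int) (cs.length : Int) 1).foldl (pvBodyA cs) acc = acc ++ pvRender suf := by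
  intro suf
  induction suf with
  | nil =>
    intro k h acc
    have hk : cs.length ≤ k := by
      by_contra hlt
      have : cs.drop k ≠ [] := by
        simp [List.drop_eq_nil_iff]; omega
      exact this h
    rw [pyRange_nil_of_le _ _ (by exact_mod_cast hk)]
    simp [pvRender]
  | cons c suf' ih =>
    intro k h acc
    have hk : k < cs.length := by
      by_contra hge
      have : cs.drop k = [] := List.drop_eq_nil_iff.mpr (by omega)
      rw [this] at h; exact (List.cons_ne_nil c suf') h.symm
    have h2 : cs[k] :: cs.drop (k + 1) = c :: suf' := by
      rw [List.getElem_cons_drop]; exact h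
    rw [List.cons_eq_cons] at h2
    have hck : cs.getD k ' ' = c := by
      simp [List.getD, List.getElem?_eq_getElem hk, h2.1]
    have hdrop' : cs.drop (k + 1) = suf' := h2.2
    rw [PySem.List.pyRange_one_cons (by exact_mod_cast hk)]
    rw [List.foldl_cons]
    have hstep : pvBodyA cs acc (k : Int) = acc ++ (if c = ' ' then ['_']
     else PySem.Chars.upperChar c ::
       (match suf' with
        | [] => []
        | d :: _ => if d = ' ' then [] else ['-'])) := by
      simp only [pvBodyA, PySem.List.pyGetD_natCast, hck]
      by_cases hc : c = ' '
      · simp [hc]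
      · simp only [hc]
        cases suf' with
        | nil =>
          have hlen : k = cs.length - 1 := by
            have : cs.drop (k+1) = [] := hdrop'
            have : cs.length ≤ k + 1 := by
              by_contra hh
              exact (by simp [List.drop_eq_nil_iff]; omega : cs.drop (k+1) ≠ []) this
            omega
          have : (k : Int) = (cs.length : Int) - 1 := by omega
          simp [this, PySem.Chars.upper, hc]
        | cons d rest' =>
          have hne : (k : Int) ≠ (cs.length : Int) - 1 := by
            have : cs.drop (k+1) ≠ [] := by rw [hdrop']; exact List.cons_ne_nil d rest'
            have hlt : k + 1 < cs.length := by
              by_contra hh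
              exact this (List.drop_eq_nil_iff.mpr (by omega))
            omega
          have hlt : k + 1 < cs.length := by
            have : cs.drop (k+1) ≠ [] := by rw [hdrop']; exact List.cons_ne_nil d rest'
            by_contra hh
            exact this (List.drop_eq_nil_iff.mpr (by omega))
          have hd : cs.getD (k+1) ' ' = d := by
            have h3 : cs[k+1] :: cs.drop (k + 2) = d :: rest' := by
              rw [List.getElem_cons_drop]; exact hdrop'
            rw [List.cons_eq_cons] at h3
            simp [List.getD, List.getElem?_eq_getElem hlt, h3.1]
          have hcast : ((k : Int) + 1) = ((k + 1 : Nat) : Int) := by push_cast; ring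
          rw [hcast, PySem.List.pyGetD_natCast, hd]
          by_cases hds : d = ' '
          · simp [hds, PySem.Chars.upper, hc]
          · simp [hds, hne, PySem.Chars.upper, hc]
    rw [hstep]
    have hcast2 : ((k : Int) + 1) = ((k + 1 : Nat) : Int) := by push_cast; ring
    rw [hcast2, ih (k + 1) hdrop']
    cases suf' <;> simp [pvRender, List.append_assoc]

-- B's split/join produces pvRender too
theorem inter_cons (sep x : List Char) (T : List (List Char)) :
    List.intercalate sep (x :: T) = x ++ (if T = [] then [] else sep ++ List.intercalate sep T) := by
  cases T with
  | nil => simp [List.intercalate]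
  | cons y T' => simp [List.intercalate, List.intersperse]

theorem pvRender_cons (c : Char) (rest : List Char) :
    pvRender (c :: rest) = (if c = ' ' then ['_']
      else PySem.Chars.upperChar c ::
        (match rest with
         | [] => []
         | d :: _ => if d = ' ' then [] else ['-'])) ++ pvRender rest := rfl

theorem altB_eq (cs : List Char) :
    List.intercalate ['_'] ((cs.splitOn ' ').map (fun w =>
      List.intercalate ['-'] (w.map (fun c => [PySem.Chars.upperChar c])))) = pvRender cs := by
  induction cs with
  | nil => simp [List.splitOn, List.splitOnP_nil, List.intercalate, pvRender]
  | cons c rest ih =>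
    obtain ⟨w, L, hWL⟩ : ∃ w L, rest.splitOnP (· == ' ') = w :: L := by
      cases hsp : rest.splitOnP (· == ' ') with
      | nil => exact absurd hsp (List.splitOnP_ne_nil _ rest)
      | cons w L => exact ⟨w, L, rfl⟩
    simp only [List.splitOn] at ih ⊢
    rw [hWL, List.map_cons] at ih
    rw [List.splitOnP_cons]
    by_cases hc : c = ' '
    · -- leading space: an empty word is prepended, contributing exactly one '_'
      rw [if_pos (by simp [hc]), hWL, List.map_cons, List.map_cons, inter_cons,
        if_neg (by simp)]
      rw [ih]
      simp [pvRender, hc, List.intercalate]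
    · -- c is consed onto the head word of rest's split
      rw [if_neg (by simp [hc]), hWL, List.modifyHead_cons, List.map_cons, inter_cons]
      rw [inter_cons] at ih
      cases hrest : rest with
      | nil =>
        have hwL : w = [] ∧ L = [] := by
          rw [hrest, List.splitOnP_nil] at hWL
          exact ⟨(List.cons_eq_cons.mp hWL).1.symm, (List.cons_eq_cons.mp hWL).2.symm⟩
        rw [hwL.1, hwL.2]
        simp [List.intercalate, pvRender, hc]
      | cons d rest' =>
        rw [hrest, List.splitOnP_cons] at hWL
        by_cases hd : d = ' '
        · -- next char is a space: head word w is empty, no dash after c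
          rw [if_pos (by simp [hd])] at hWL
          have hw : w = [] := (List.cons_eq_cons.mp hWL).1.symm
          have hLne : L ≠ [] := by
            rw [← (List.cons_eq_cons.mp hWL).2]
            exact List.splitOnP_ne_nil _ rest'
          rw [hw] at ih ⊢
          rw [if_neg (by simp [hLne])] at ih ⊢
          have hW0 : List.intercalate ['-']
              (List.map (fun c => [PySem.Chars.upperChar c]) ([] : List Char)) = [] := by
            simp [List.intercalate]
          rw [hW0, List.nil_append] at ih
          have hW1 : List.intercalate ['-']
              (List.map (fun c => [PySem.Chars.upperChar c]) [c]) = [PySem.Chars.upperChar c] := by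
            simp [List.intercalate]
          rw [hW1, ih, pvRender_cons]
          simp [hrest, hd, hc]
        · -- next char is not a space: w starts with d, so a dash follows c
          rw [if_neg (by simp [hd])] at hWL
          obtain ⟨w'', L'', hsp'⟩ : ∃ w'' L'', rest'.splitOnP (· == ' ') = w'' :: L'' := by
            cases hsp' : rest'.splitOnP (· == ' ') with
            | nil => exact absurd hsp' (List.splitOnP_ne_nil _ rest')
            | cons a b => exact ⟨a, b, rfl⟩
          rw [hsp', List.modifyHead_cons] at hWL
          have hw : w = d :: w'' := (List.cons_eq_cons.mp hWL).1.symm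
          rw [hw, List.map_cons, List.map_cons, inter_cons, if_neg (by simp)]
          rw [hw] at ih
          simp only [List.map_cons, List.cons_append, List.nil_append] at ih ⊢
          rw [ih, pvRender_cons]
          simp [hrest, hd, hc]

-- ===== VERDICT (by name: the statement is the Claim_ definition above) =====
theorem formatMMsg_spec : Claim_equal_formatMMsg := by
  intro txt _
  unfold Spec_formatMMsg formatMMsg formatMMsg_alt
  dsimp only
  rw [altB_eq]
  rw [show ((0 : Int)) = ((0 : Nat) : Int) from rfl]
  rw [loopA_eq txt.toList txt.toList 0 (by simp) []]
  simp
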